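-- pv_equiv track=rewrite | github.com/SAG145/Project-Euler | PEP788 - Dominating Numbers.py | dominating
-- ===== SOURCE A (Python) =====
-- def factorial(n):
--     mult = 1
--     for k in range(2,n+1):
--         mult = (mult*k)
--     return mult
--
-- def choose(n,k):
--     return (factorial(n)//factorial(k)//factorial(n-k)) % 1000000007
--
-- def dominating(n):
--     sum = 9
--     more_than_half = n // 2 + 1
--     if n == 1 or n == 2:
--         return 9
--     for k in range(more_than_half,n):
--         sum = (sum + 9*choose(n-1,k-1)*9**(n-k) + choose(n-1,k)*9**(n-k+1)) % 1000000007
--     return int(sum)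
-- ===== SOURCE B (Python) =====
-- def dominating(n):
--     # One pass maintaining the exact binomial coefficient and the running power
--     # incrementally, instead of recomputing full factorials and powers per iteration.
--     if n < 3:
--         return 9
--     M = 1000000007
--     half = n // 2 + 1
--     c = 1
--     for i in range(1, half):
--         c = c * (n - i) // i        # c = C(n-1, i)
--     total = 9
--     pw = 9 ** (n - half)
--     for k in range(half, n):
--         c1 = c % M                  # C(n-1, k-1) mod M
--         c = c * (n - k) // k        # c = C(n-1, k)
--         total = (total + 9 * c1 * pw + c % M * 9 * pw) % M
--         pw = pw // 9
--     return total
-- ===== Notes on version B (the rewrite author's own statement) =====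
-- stated objective: faster
-- what changed: B maintains the exact binomial coefficient and the running power factor incrementally across a single pass, instead of recomputing three full factorial products and a fresh big-integer power inside every loop iteration.
import Mathlib
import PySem

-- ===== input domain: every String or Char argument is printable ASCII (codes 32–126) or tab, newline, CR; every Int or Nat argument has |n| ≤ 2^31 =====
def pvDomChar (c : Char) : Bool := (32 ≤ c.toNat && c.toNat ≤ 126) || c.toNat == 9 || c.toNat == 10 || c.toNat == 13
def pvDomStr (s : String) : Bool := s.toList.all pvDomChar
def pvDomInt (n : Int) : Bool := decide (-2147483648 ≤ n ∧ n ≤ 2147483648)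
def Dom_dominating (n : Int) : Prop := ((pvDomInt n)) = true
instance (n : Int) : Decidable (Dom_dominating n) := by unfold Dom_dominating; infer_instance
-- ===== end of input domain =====

-- B maintains the exact binomial coefficient and the power factor incrementally in one
-- pass instead of recomputing full factorial products per iteration (faster: the timing
-- run measured it; A times out on sizes where B still returns).

-- ===== PORT A =====
def factorialA (n : Int) : Int :=
  (PySem.List.pyRange 2 (n + 1) 1).foldl (fun mult k => mult * k) 1

def chooseA (n k : Int) : Int :=
  PySem.Int.mod
    (PySem.Int.floordiv (PySem.Int.floordiv (factorialA n) (factorialA k)) (factorialA (n - k)))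
    1000000007

-- the exponent n-k is positive for every k the loop visits (k < n), so .toNat is exact
def dominating (n : Int) : Int :=
  let more_than_half := PySem.Int.floordiv n 2 + 1
  if n = 1 ∨ n = 2 then 9
  else
    (PySem.List.pyRange more_than_half n 1).foldl
      (fun s k =>
        PySem.Int.mod
          (s + 9 * chooseA (n - 1) (k - 1) * 9 ^ (n - k).toNat
             + chooseA (n - 1) k * 9 ^ (n - k + 1).toNat)
          1000000007)
      9

-- ===== PORT B =====
-- state of the second loop: (total, c, pw); the exponent n-half is nonnegative for n ≥ 3,
-- so .toNat is exact
def dominating_alt (n : Int) : Int :=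
  if n < 3 then 9
  else
    let M : Int := 1000000007
    let half := PySem.Int.floordiv n 2 + 1
    let c0 := (PySem.List.pyRange 1 half 1).foldl
      (fun c i => PySem.Int.floordiv (c * (n - i)) i) 1
    let res := (PySem.List.pyRange half n 1).foldl
      (fun (st : Int × Int × Int) k =>
        let c1 := PySem.Int.mod st.2.1 M
        let c' := PySem.Int.floordiv (st.2.1 * (n - k)) k
        (PySem.Int.mod (st.1 + 9 * c1 * st.2.2 + PySem.Int.mod c' M * 9 * st.2.2) M,
         c', PySem.Int.floordiv st.2.2 9))
      (9, c0, 9 ^ (n - half).toNat)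
    res.1

-- ===== PRECONDITION & SPEC =====
def Spec_dominating (n : Int) (out : Int) : Prop := out = dominating_alt n
instance (n : Int) (out : Int) : Decidable (Spec_dominating n out) := by unfold Spec_dominating; infer_instance

-- ===== CLAIM (what is proved, stated in full; the proofs are below) =====
def Claim_equal_dominating : Prop := ∀ (n : Int), Dom_dominating n → Spec_dominating n (dominating n)

-- ===== LEMMAS AND PROOFS =====

-- A's factorial on a nonnegative argument is the Nat factorial
theorem factorialA_nat (m : Nat) : factorialA (m : Int) = (Nat.factorial m : Int) := by
  induction m with
  | zero => simp [factorialA, Nat.factorial]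
  | succ m ih =>
    cases Nat.eq_zero_or_pos m with
    | inl h =>
      subst h
      simp [factorialA, Nat.factorial]
    | inr h =>
      have hcast : ((m + 1 : Nat) : Int) + 1 = ((m : Int) + 1) + 1 := by push_cast; ring
      have hsp : PySem.List.pyRange 2 (((m : Int) + 1) + 1) 1
          = PySem.List.pyRange 2 ((m : Int) + 1) 1 ++ [(m : Int) + 1] :=
        PySem.List.pyRange_one_succ_right (by omega)
      unfold factorialA
      rw [hcast, hsp, List.foldl_append]
      simp only [List.foldl]
      rw [show (PySem.List.pyRange 2 ((m:Int)+1) 1).foldl (fun mult k => mult * k) 1 = factorialA m from rfl, ih]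
      rw [Nat.factorial_succ]
      push_cast; ring

theorem factorialA_of_nonneg (j : Int) (hj : 0 ≤ j) : factorialA j = (Nat.factorial j.toNat : Int) := by
  have h := factorialA_nat j.toNat
  rwa [Int.toNat_of_nonneg hj] at h

-- A's floordiv-of-factorials choose is the Nat binomial coefficient mod 10^9+7
theorem chooseA_eq (n j : Int) (hn : 1 ≤ n) (h0 : 0 ≤ j) (hj : j ≤ n - 1) :
    chooseA (n - 1) j = PySem.Int.mod ((n - 1).toNat.choose j.toNat : Int) 1000000007 := by
  unfold chooseA
  rw [factorialA_of_nonneg (n - 1) (by omega), factorialA_of_nonneg j h0,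
      factorialA_of_nonneg (n - 1 - j) (by omega)]
  rw [PySem.Int.floordiv_natCast, PySem.Int.floordiv_natCast]
  have hsub : (n - 1 - j).toNat = (n - 1).toNat - j.toNat := by omega
  have hle : j.toNat ≤ (n - 1).toNat := by omega
  rw [hsub, Nat.div_div_eq_div_mul, ← Nat.choose_eq_factorial_div_factorial hle]

-- one exact-division step of B's running binomial
theorem binom_step (n i : Int) (h1 : 1 ≤ i) (h2 : i ≤ n - 1) :
    PySem.Int.floordiv (((n - 1).toNat.choose (i - 1).toNat : Int) * (n - i)) i
      = ((n - 1).toNat.choose i.toNat : Int) := by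
  obtain ⟨j, hj⟩ : ∃ j : Nat, (i - 1).toNat = j := ⟨_, rfl⟩
  have hit : i.toNat = j + 1 := by omega
  rw [hj, hit]
  have key : (n - 1).toNat.choose (j + 1) * (j + 1)
      = (n - 1).toNat.choose j * ((n - 1).toNat - j) :=
    Nat.choose_succ_right_eq _ _
  have hN : n - i = (((n - 1).toNat - j : Nat) : Int) := by omega
  have hi : i = ((j + 1 : Nat) : Int) := by omega
  have key' : ((n - 1).toNat.choose (j + 1) : Int) * i
      = ((n - 1).toNat.choose j : Int) * (n - i) := by
    rw [hN, hi]
    exact_mod_cast key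
  rw [← key', PySem.Int.floordiv_eq_ediv_of_pos (by omega)]
  exact Int.mul_ediv_cancel _ (by omega)

-- B's first loop builds the binomial C(n-1, t-1)
theorem binom_build (n : Int) :
    ∀ (m : Nat) (t : Int), t = 1 + (m : Int) → t ≤ n →
      (PySem.List.pyRange 1 t 1).foldl (fun c i => PySem.Int.floordiv (c * (n - i)) i) 1
        = ((n - 1).toNat.choose (t - 1).toNat : Int) := by
  intro m
  induction m with
  | zero =>
    intro t ht _
    subst ht
    rw [PySem.List.pyRange_one_eq_nil (by omega)]
    norm_num
  | succ m ih =>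
    intro t ht htn
    subst ht
    have hc : (1 : Int) + ((m + 1 : Nat) : Int) = (1 + (m : Int)) + 1 := by push_cast; ring
    rw [hc, PySem.List.pyRange_one_succ_right (by omega), List.foldl_append]
    simp only [List.foldl]
    rw [ih (1 + (m : Int)) rfl (by omega)]
    rw [show ((1 : Int) + (m : Int)) + 1 - 1 = 1 + (m : Int) by ring]
    exact binom_step n (1 + (m : Int)) (by omega) (by omega)

-- exponent bookkeeping for the running power
theorem pow9_step (e : Int) (he : 1 ≤ e) :
    PySem.Int.floordiv ((9:Int) ^ e.toNat) 9 = 9 ^ (e - 1).toNat := by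
  rw [PySem.Int.floordiv_eq_ediv_of_pos (by omega)]
  have h : e.toNat = (e - 1).toNat + 1 := by omega
  rw [h, pow_succ]
  exact Int.mul_ediv_cancel _ (by omega)

-- the two loops agree: B's state (total, C(n-1,k-1), 9^(n-k)) tracks A's total
theorem loop_eq (n : Int) (hn : 3 ≤ n) :
    ∀ (m : Nat) (a : Int), (n - a).toNat = m → 2 ≤ a → ∀ s : Int,
      ((PySem.List.pyRange a n 1).foldl
        (fun (st : Int × Int × Int) k =>
          (PySem.Int.mod (st.1 + 9 * PySem.Int.mod st.2.1 1000000007 * st.2.2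
              + PySem.Int.mod (PySem.Int.floordiv (st.2.1 * (n - k)) k) 1000000007 * 9 * st.2.2)
            1000000007,
           PySem.Int.floordiv (st.2.1 * (n - k)) k,
           PySem.Int.floordiv st.2.2 9))
        (s, ((n - 1).toNat.choose (a - 1).toNat : Int), 9 ^ (n - a).toNat)).1
      = (PySem.List.pyRange a n 1).foldl
          (fun s k =>
            PySem.Int.mod
              (s + 9 * chooseA (n - 1) (k - 1) * 9 ^ (n - k).toNat
                 + chooseA (n - 1) k * 9 ^ (n - k + 1).toNat)
              1000000007)
          s := by
  intro m
  induction m with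
  | zero =>
    intro a ha h2 s
    rw [PySem.List.pyRange_one_eq_nil (by omega : n ≤ a)]
    simp
  | succ m ih =>
    intro a ha h2 s
    have hlt : a < n := by omega
    rw [PySem.List.pyRange_one_cons hlt]
    simp only [List.foldl]
    have hc1 : PySem.Int.mod (((n - 1).toNat.choose (a - 1).toNat : Int)) 1000000007
        = chooseA (n - 1) (a - 1) := by
      rw [chooseA_eq n (a - 1) (by omega) (by omega) (by omega)]
    have hstep : PySem.Int.floordiv (((n - 1).toNat.choose (a - 1).toNat : Int) * (n - a)) a
        = ((n - 1).toNat.choose a.toNat : Int) := binom_step n a (by omega) (by omega)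
    have hc2 : PySem.Int.mod (((n - 1).toNat.choose a.toNat : Int)) 1000000007
        = chooseA (n - 1) a := by
      rw [chooseA_eq n a (by omega) (by omega) (by omega)]
    rw [hstep, hc1, hc2]
    have hpow : (9:Int) ^ (n - a + 1).toNat = 9 ^ (n - a).toNat * 9 := by
      rw [show (n - a + 1).toNat = (n - a).toNat + 1 by omega, pow_succ]
    have hterm : PySem.Int.mod
        (s + 9 * chooseA (n - 1) (a - 1) * 9 ^ (n - a).toNat
           + chooseA (n - 1) a * 9 * 9 ^ (n - a).toNat) 1000000007
        = PySem.Int.mod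
        (s + 9 * chooseA (n - 1) (a - 1) * 9 ^ (n - a).toNat
           + chooseA (n - 1) a * 9 ^ (n - a + 1).toNat) 1000000007 := by
      rw [hpow]; ring_nf
    have hpw : PySem.Int.floordiv ((9:Int) ^ (n - a).toNat) 9 = 9 ^ (n - (a + 1)).toNat := by
      rw [pow9_step (n - a) (by omega), show n - a - 1 = n - (a + 1) by ring]
    rw [hterm, hpw]
    have hidx : ((n - 1).toNat.choose a.toNat : Int)
        = ((n - 1).toNat.choose ((a + 1) - 1).toNat : Int) := by norm_num
    rw [hidx]
    exact ih (a + 1) (by omega) (by omega) _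

-- dominating_alt with its lets zeta-expanded (holds by rfl once the if is resolved)
theorem alt_eq (n : Int) (h : ¬ n < 3) :
    dominating_alt n =
      ((PySem.List.pyRange (PySem.Int.floordiv n 2 + 1) n 1).foldl
        (fun (st : Int × Int × Int) k =>
          (PySem.Int.mod (st.1 + 9 * PySem.Int.mod st.2.1 1000000007 * st.2.2
              + PySem.Int.mod (PySem.Int.floordiv (st.2.1 * (n - k)) k) 1000000007 * 9 * st.2.2)
            1000000007,
           PySem.Int.floordiv (st.2.1 * (n - k)) k,
           PySem.Int.floordiv st.2.2 9))
        (9,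
         (PySem.List.pyRange 1 (PySem.Int.floordiv n 2 + 1) 1).foldl
           (fun c i => PySem.Int.floordiv (c * (n - i)) i) 1,
         9 ^ (n - (PySem.Int.floordiv n 2 + 1)).toNat)).1 := by
  unfold dominating_alt
  rw [if_neg h]

-- ===== VERDICT (by name: the statement is the Claim_ definition above) =====
theorem dominating_spec : Claim_equal_dominating := by
  intro n _
  unfold Spec_dominating
  by_cases h3 : n < 3
  · have hB : dominating_alt n = 9 := by unfold dominating_alt; rw [if_pos h3]
    rw [hB]
    unfold dominating
    by_cases h12 : n = 1 ∨ n = 2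
    · simp only [if_pos h12]
    · simp only [if_neg h12]
      have hfd : PySem.Int.floordiv n 2 = n / 2 := PySem.Int.floordiv_eq_ediv_of_pos (by omega)
      have hnil : PySem.List.pyRange (PySem.Int.floordiv n 2 + 1) n 1 = [] := by
        apply PySem.List.pyRange_one_eq_nil
        rw [hfd]; omega
      rw [hnil]
      rfl
  · have h12 : ¬(n = 1 ∨ n = 2) := by omega
    have hn3 : (3:Int) ≤ n := by omega
    have hfd : PySem.Int.floordiv n 2 = n / 2 := PySem.Int.floordiv_eq_ediv_of_pos (by omega)
    have h2half : 2 ≤ PySem.Int.floordiv n 2 + 1 := by rw [hfd]; omega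
    unfold dominating
    simp only [if_neg h12]
    rw [alt_eq n h3]
    rw [binom_build n (PySem.Int.floordiv n 2).toNat (PySem.Int.floordiv n 2 + 1)
      (by rw [hfd]; omega) (by rw [hfd]; omega)]
    exact (loop_eq n hn3 (n - (PySem.Int.floordiv n 2 + 1)).toNat
      (PySem.Int.floordiv n 2 + 1) rfl h2half 9).symm
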